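-- pv_equiv track=rewrite | github.com/yannickloth/W33-Theory | tests/test_matroid_theory_computation.py | _matroid_rank_and_components
-- ===== SOURCE A (Python) =====
-- class _UnionFind:
--     def __init__(self, n):
--         self.parent = list(range(n))
--         self.sz = [1] * n
--         self.num_components = n
--
--     def find(self, x):
--         while self.parent[x] != x:
--             self.parent[x] = self.parent[self.parent[x]]
--             x = self.parent[x]
--         return x
--
--     def union(self, a, b):
--         a, b = self.find(a), self.find(b)
--         if a == b:
--             return False
--         if self.sz[a] < self.sz[b]:
--             a, b = b, a
--         self.parent[b] = a
--         self.sz[a] += self.sz[b]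
--         self.num_components -= 1
--         return True
--
--     def connected(self, a, b):
--         return self.find(a) == self.find(b)
--
-- def _matroid_rank_and_components(edges, n, edge_indices):
--     """Return (rank, num_components) for edge subset."""
--     uf = _UnionFind(n)
--     rank = 0
--     for idx in edge_indices:
--         u, v = edges[idx]
--         if uf.union(u, v):
--             rank += 1
--     return rank, uf.num_components
-- ===== SOURCE B (Python) =====
-- def _matroid_rank_and_components(edges, n, edge_indices):
--     """Return (rank, num_components) for edge subset."""
--     labels = list(range(n))
--     rank = 0
--     for idx in edge_indices:
--         u, v = edges[idx]
--         lu, lv = labels[u], labels[v]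
--         if lu != lv:
--             labels = [lu if l == lv else l for l in labels]
--             rank += 1
--     return rank, n - rank
-- ===== Notes on version B (the rewrite author's own statement) =====
-- stated objective: alternative
-- what changed: Replaces the union-find (path halving + union by size + component counter) with a flat component-label list that is relabelled wholesale on each merging edge, returning num_components as n - rank instead of maintaining a counter.
import Mathlib
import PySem

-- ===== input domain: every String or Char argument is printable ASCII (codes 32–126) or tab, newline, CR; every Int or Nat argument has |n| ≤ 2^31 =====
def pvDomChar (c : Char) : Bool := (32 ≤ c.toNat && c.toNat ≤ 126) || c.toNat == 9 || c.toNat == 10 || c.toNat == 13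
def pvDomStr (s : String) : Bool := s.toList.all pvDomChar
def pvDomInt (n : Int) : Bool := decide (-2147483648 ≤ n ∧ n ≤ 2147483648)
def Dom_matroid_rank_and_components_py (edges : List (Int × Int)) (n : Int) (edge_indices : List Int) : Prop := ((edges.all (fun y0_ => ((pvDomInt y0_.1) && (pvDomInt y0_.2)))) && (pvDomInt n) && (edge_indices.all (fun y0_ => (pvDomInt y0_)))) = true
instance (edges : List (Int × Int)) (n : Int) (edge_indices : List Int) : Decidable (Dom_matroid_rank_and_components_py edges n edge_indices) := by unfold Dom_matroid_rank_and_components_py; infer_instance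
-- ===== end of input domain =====

-- B replaces the union-find of A by a flat component-label list relabelled on each merging
-- edge, returning num_components as n - rank; equal return values on all of Pre_.

-- ===== PORT A =====
-- _UnionFind.find with path halving; the while loop is run with fuel n + m + 1, which the
-- proofs show is never exhausted on states reachable inside Pre_ (root depth starts at 0 and
-- grows by at most 1 per union); none = IndexError.
def pvFindA (fuel : Nat) (parent : List Int) (x : Int) : Option (List Int × Int) :=
  match fuel with
  | 0 => none
  | f + 1 =>
    match PySem.List.pyGet? parent x with
    | none => none
    | some px =>
      if px = x then some (parent, x)
      else
        match PySem.List.pyGet? parent px with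
        | none => none
        | some ppx =>
          match PySem.List.pySet? parent x ppx with
          | none => none
          | some p' => pvFindA f p' ppx

-- _UnionFind.union: state is (parent, sz, num_components); returns the Bool union returns.
def pvUnionA (fuel : Nat) (parent sz : List Int) (num : Int) (a b : Int) :
    Option (List Int × List Int × Int × Bool) :=
  match pvFindA fuel parent a with
  | none => none
  | some (p1, ra) =>
    match pvFindA fuel p1 b with
    | none => none
    | some (p2, rb) =>
      if ra = rb then some (p2, sz, num, false)
      else
        match PySem.List.pyGet? sz ra, PySem.List.pyGet? sz rb with
        | some sa, some sb =>
          let ab := if sa < sb then (rb, ra) else (ra, rb)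
          match PySem.List.pySet? p2 ab.2 ab.1 with
          | none => none
          | some p3 =>
            match PySem.List.pyGet? sz ab.1, PySem.List.pyGet? sz ab.2 with
            | some sa', some sb' =>
              match PySem.List.pySet? sz ab.1 (sa' + sb') with
              | none => none
              | some sz' => some (p3, sz', num - 1, true)
            | _, _ => none
        | _, _ => none

-- the 'for idx in edge_indices' loop; state (parent, sz, num_components, rank)
def pvLoopA (edges : List (Int × Int)) (fuel : Nat) :
    List Int → List Int × List Int × Int × Int → Option (List Int × List Int × Int × Int)
  | [], st => some st
  | idx :: rest, (p, sz, num, rank) =>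
    match PySem.List.pyGet? edges idx with
    | none => none
    | some (u, v) =>
      match pvUnionA fuel p sz num u v with
      | none => none
      | some (p', sz', num', did) =>
        pvLoopA edges fuel rest (p', sz', num', if did then rank + 1 else rank)

def matroid_rank_and_components_py (edges : List (Int × Int)) (n : Int) (edge_indices : List Int) : Int × Int :=
  let parent := PySem.List.pyRange 0 n 1          -- list(range(n))
  let sz := List.replicate n.toNat (1 : Int)      -- [1] * n
  match pvLoopA edges (parent.length + edge_indices.length + 1) edge_indices (parent, sz, n, 0) with
  | none => (0, 0)                                -- unreachable inside Pre_ (an exception in Python)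
  | some (_, _, num, rank) => (rank, num)

-- ===== PORT B =====
-- the 'for idx in edge_indices' loop of B; state (labels, rank)
def pvLoopB (edges : List (Int × Int)) :
    List Int → List Int × Int → Option (List Int × Int)
  | [], st => some st
  | idx :: rest, (labels, rank) =>
    match PySem.List.pyGet? edges idx with
    | none => none
    | some (u, v) =>
      match PySem.List.pyGet? labels u, PySem.List.pyGet? labels v with
      | some lu, some lv =>
        if lu = lv then pvLoopB edges rest (labels, rank)
        else pvLoopB edges rest (labels.map (fun l => if l = lv then lu else l), rank + 1)
      | _, _ => none

def matroid_rank_and_components_py_alt (edges : List (Int × Int)) (n : Int) (edge_indices : List Int) : Int × Int :=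
  match pvLoopB edges edge_indices (PySem.List.pyRange 0 n 1, 0) with
  | none => (0, 0)                                -- unreachable inside Pre_ (an exception in Python)
  | some (_, rank) => (rank, n - rank)

-- ===== PRECONDITION & SPEC =====
-- Exactly the inputs where A returns normally: every selected index is a valid (possibly
-- negative, Python-style) index into edges, and both endpoints of the selected edge are valid
-- indices into the n parent slots; otherwise Python raises IndexError.
def Pre_matroid_rank_and_components_py (edges : List (Int × Int)) (n : Int) (edge_indices : List Int) : Prop :=
  ∀ idx ∈ edge_indices, (-(edges.length : Int) ≤ idx ∧ idx < (edges.length : Int)) ∧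
    (let e := (PySem.List.pyGet? edges idx).getD (0, 0);
     -n ≤ e.1 ∧ e.1 < n ∧ -n ≤ e.2 ∧ e.2 < n)
instance (edges : List (Int × Int)) (n : Int) (edge_indices : List Int) : Decidable (Pre_matroid_rank_and_components_py edges n edge_indices) := by unfold Pre_matroid_rank_and_components_py; infer_instance
def pvWitness_matroid_rank_and_components_py : (List (Int × Int)) × Int × List Int := ([(0, 1), (1, 2), (0, 2)], 4, [0, 1, 2])
def Spec_matroid_rank_and_components_py (edges : List (Int × Int)) (n : Int) (edge_indices : List Int) (out : Int × Int) : Prop := out = matroid_rank_and_components_py_alt edges n edge_indices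
instance (edges : List (Int × Int)) (n : Int) (edge_indices : List Int) (out : Int × Int) : Decidable (Spec_matroid_rank_and_components_py edges n edge_indices out) := by unfold Spec_matroid_rank_and_components_py; infer_instance

-- ===== CLAIM (what is proved, stated in full; the proofs are below) =====
def Claim_equal_matroid_rank_and_components_py : Prop := ∀ (edges : List (Int × Int)) (n : Int) (edge_indices : List Int), Dom_matroid_rank_and_components_py edges n edge_indices → Pre_matroid_rank_and_components_py edges n edge_indices → Spec_matroid_rank_and_components_py edges n edge_indices (matroid_rank_and_components_py edges n edge_indices)

-- ===== LEMMAS AND PROOFS =====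

-- parent viewed as a function on Nat indices
def pvF (p : List Int) (i : Nat) : Nat := (p.getD i 0).toNat
-- all entries are in [0, length)
def pvGood (p : List Int) : Prop := ∀ i < p.length, 0 ≤ p.getD i 0 ∧ (p.getD i 0).toNat < p.length
-- i reaches the root r in k steps
def pvReach (p : List Int) (k i r : Nat) : Prop := (pvF p)^[k] i = r ∧ pvF p r = r
-- every node reaches some root within U steps
def pvBnd (p : List Int) (U : Nat) : Prop := ∀ i < p.length, ∃ k ≤ U, ∃ r, pvReach p k i r
-- p' has the same root function as p, with no larger depths
def pvPres (p p' : List Int) : Prop := ∀ i k r, pvReach p k i r → ∃ k' ≤ k, pvReach p' k' i r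
-- a and b are in the same component
def pvSame (p : List Int) (a b : Nat) : Prop := ∃ r ka kb, pvReach p ka a r ∧ pvReach p kb b r
-- labels induce exactly the components of p
def pvRel (labels p : List Int) : Prop :=
  ∀ a b : Nat, a < p.length → b < p.length →
    (labels.getD a 0 = labels.getD b 0 ↔ pvSame p a b)

theorem pvIdx_lt {n : Nat} {i : Int} {j : Nat} (h : PySem.List.pyIdx? n i = some j) : j < n := by
  simp only [PySem.List.pyIdx?] at h
  split_ifs at h <;> simp_all <;> omega

theorem pvGet_eq {α : Type} {xs : List α} {i : Int} {j : Nat} (d : α)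
    (h : PySem.List.pyIdx? xs.length i = some j) :
    PySem.List.pyGet? xs i = some (xs.getD j d) := by
  have hj := pvIdx_lt h
  simp [PySem.List.pyGet?, h, List.getD_eq_getElem?_getD, List.getElem?_eq_getElem hj]

theorem pvSet_eq {xs : List Int} {i : Int} {j : Nat} (v : Int)
    (h : PySem.List.pyIdx? xs.length i = some j) :
    PySem.List.pySet? xs i v = some (xs.set j v) := by
  simp [PySem.List.pySet?, h]

theorem pvIdx_natCast {n j : Nat} (h : j < n) : PySem.List.pyIdx? n (j : Int) = some j := by
  simp [PySem.List.pyIdx?, h]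

theorem pvF_set {p : List Int} {x : Nat} (hx : x < p.length) (v j : Nat) :
    pvF (p.set x ((v : Nat) : Int)) j = if j = x then v else pvF p j := by
  by_cases hj : j < p.length
  · simp only [pvF, List.getD_eq_getElem?_getD, List.getElem?_set]
    split_ifs with c1 c2 c3
    · simp
    · omega
    · omega
    · rfl
  · have hjx : j ≠ x := by omega
    have hle : p.length ≤ j := by omega
    have e1 : (p.set x ((v : Nat) : Int))[j]? = none := List.getElem?_eq_none (by simpa using hle)
    have e2 : p[j]? = none := List.getElem?_eq_none hle
    simp [pvF, hjx, List.getD_eq_getElem?_getD, e1, e2]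

theorem pvReach_unique {p : List Int} {k k' i r r' : Nat} (h : pvReach p k i r) (h' : pvReach p k' i r') : r = r' := by
  rcases le_total k k' with h1 | h1
  · have : (pvF p)^[(k' - k) + k] i = r := by
      rw [Function.iterate_add_apply, h.1, Function.iterate_fixed h.2]
    rw [Nat.sub_add_cancel h1, h'.1] at this
    omega
  · have : (pvF p)^[(k - k') + k'] i = r' := by
      rw [Function.iterate_add_apply, h'.1, Function.iterate_fixed h'.2]
    rw [Nat.sub_add_cancel h1, h.1] at this
    omega

theorem pvSame_iff_root {p : List Int} {a b ra rb ka kb : Nat}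
    (ha : pvReach p ka a ra) (hb : pvReach p kb b rb) : pvSame p a b ↔ ra = rb := by
  constructor
  · rintro ⟨r, k1, k2, h1, h2⟩
    rw [pvReach_unique h1 ha] at *
    exact (pvReach_unique h2 hb).symm ▸ rfl
  · rintro rfl
    exact ⟨ra, ka, kb, ha, hb⟩

theorem pvRoot_lt {p : List Int} (hg : pvGood p) :
    ∀ (k i r : Nat), i < p.length → pvReach p k i r → r < p.length := by
  intro k
  induction k with
  | zero => intro i r hi h; rw [← h.1]; simpa using hi
  | succ k ih =>
    intro i r hi h
    exact ih (pvF p i) r ((hg i hi).2)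
      ⟨by rw [← h.1, Function.iterate_succ_apply], h.2⟩

-- find's parent update preserves every reach (with no larger witness)
theorem pvUpdate_pres {p : List Int} {x : Nat}
    (hx : x < p.length) (hne : pvF p x ≠ x) :
    pvPres p (p.set x ((pvF p (pvF p x) : Nat) : Int)) := by
  set y := pvF p (pvF p x) with hy
  set q := p.set x ((y : Nat) : Int) with hq
  have hFq : ∀ j, pvF q j = if j = x then y else pvF p j := fun j => pvF_set hx y j
  have hroot : ∀ r₁, pvF p r₁ = r₁ → pvF q r₁ = r₁ := by
    intro r₁ h1
    have hne' : r₁ ≠ x := by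
      intro h; apply hne; rw [← h] at *; exact h1
    rw [hFq, if_neg hne']; exact h1
  intro i k r₁
  induction k using Nat.strong_induction_on generalizing i r₁ with
  | _ k ih =>
    intro hk
    match k with
    | 0 =>
      have hir : i = r₁ := hk.1
      subst hir
      exact ⟨0, le_refl _, rfl, hroot _ hk.2⟩
    | Nat.succ k =>
      by_cases hfix : pvF p i = i
      · have hir : i = r₁ := by
          have h1 := hk.1
          rw [Function.iterate_fixed hfix] at h1
          exact h1
        subst hir
        exact ⟨0, by omega, rfl, hroot _ hk.2⟩
      · by_cases hix : i = x
        · subst hix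
          match k with
          | 0 =>
            have h1 : pvF p i = r₁ := by
              have := hk.1; rwa [Function.iterate_one] at this
            have hyr : y = r₁ := by rw [hy, h1]; exact hk.2
            refine ⟨1, le_refl _, ?_, hroot _ hk.2⟩
            rw [Function.iterate_one, hFq, if_pos rfl]
            exact hyr
          | Nat.succ k₁ =>
            have h2 : pvReach p k₁ y r₁ := by
              refine ⟨?_, hk.2⟩
              have := hk.1
              rwa [Function.iterate_succ_apply, Function.iterate_succ_apply] at this
            obtain ⟨k₂, hk₂, h3⟩ := ih k₁ (by omega) _ _ h2
            refine ⟨k₂ + 1, by omega, ?_, h3.2⟩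
            rw [Function.iterate_succ_apply, hFq, if_pos rfl]
            exact h3.1
        · have h2 : pvReach p k (pvF p i) r₁ := by
            refine ⟨?_, hk.2⟩
            have := hk.1
            rwa [Function.iterate_succ_apply] at this
          obtain ⟨k₂, hk₂, h3⟩ := ih k (by omega) _ _ h2
          refine ⟨k₂ + 1, by omega, ?_, h3.2⟩
          rw [Function.iterate_succ_apply, hFq, if_neg hix]
          exact h3.1

theorem pvGood_set {p : List Int} {x v : Nat} (hx : x < p.length) (hv : v < p.length)
    (hg : pvGood p) : pvGood (p.set x ((v : Nat) : Int)) := by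
  intro j hj
  rw [List.length_set] at hj
  by_cases hjx : j = x
  · subst hjx
    have h1 : (p.set j ((v : Nat) : Int)).getD j 0 = ((v : Nat) : Int) := by
      simp [List.getD_eq_getElem?_getD, hx]
    rw [List.length_set, h1]
    simpa using hv
  · have h1 : (p.set x ((v : Nat) : Int)).getD j 0 = p.getD j 0 := by
      simp [List.getD_eq_getElem?_getD, Ne.symm hjx]
    rw [List.length_set, h1]
    exact hg j hj

-- the find lemma, canonical (Nat) argument
theorem pvFindA_spec : ∀ k : Nat, ∀ (p : List Int) (x r : Nat) (fuel : Nat),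
    pvGood p → x < p.length → pvReach p k x r → k < fuel →
    ∃ p', pvFindA fuel p (x : Int) = some (p', (r : Int)) ∧
      p'.length = p.length ∧ pvGood p' ∧ pvPres p p' := by
  intro k
  induction k using Nat.strong_induction_on with
  | _ k ih =>
    intro p x r fuel hg hx hr hf
    obtain ⟨fuel, rfl⟩ : ∃ f, fuel = f + 1 := ⟨fuel - 1, by omega⟩
    have hget : PySem.List.pyGet? p ((x : Nat) : Int) = some (p.getD x 0) :=
      pvGet_eq 0 (pvIdx_natCast hx)
    have hnn : 0 ≤ p.getD x 0 := (hg x hx).1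
    have hcast : p.getD x 0 = ((pvF p x : Nat) : Int) := by
      simp only [pvF]; exact (Int.toNat_of_nonneg hnn).symm
    by_cases heq : p.getD x 0 = ((x : Nat) : Int)
    · have hFx : pvF p x = x := by
        rw [hcast] at heq; exact_mod_cast heq
      have hrx : r = x := by
        have h1 := hr.1
        rw [Function.iterate_fixed hFx] at h1
        omega
      refine ⟨p, ?_, rfl, hg, fun i k' r' h => ⟨k', le_refl _, h⟩⟩
      simp only [pvFindA, hget]
      rw [if_pos heq, hrx]
    · have hFx : pvF p x ≠ x := by
        intro h; apply heq; rw [hcast, h]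
      have hk1 : 1 ≤ k := by
        rcases Nat.eq_zero_or_pos k with h | h
        · exfalso
          subst h
          have h1 : x = r := by simpa using hr.1
          exact hFx (by rw [h1]; exact hr.2)
        · exact h
      have hx1 : pvF p x < p.length := (hg x hx).2
      have hget2 : PySem.List.pyGet? p (p.getD x 0) = some (p.getD (pvF p x) 0) := by
        rw [hcast]; exact pvGet_eq 0 (pvIdx_natCast hx1)
      have hnn2 : 0 ≤ p.getD (pvF p x) 0 := (hg _ hx1).1
      have hcast2 : p.getD (pvF p x) 0 = ((pvF p (pvF p x) : Nat) : Int) := by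
        simp only [pvF]; exact (Int.toNat_of_nonneg hnn2).symm
      have hset : PySem.List.pySet? p ((x : Nat) : Int) (p.getD (pvF p x) 0) =
          some (p.set x (p.getD (pvF p x) 0)) := pvSet_eq _ (pvIdx_natCast hx)
      have hx2 : pvF p (pvF p x) < p.length := (hg _ hx1).2
      have hgq : pvGood (p.set x ((pvF p (pvF p x) : Nat) : Int)) := pvGood_set hx hx2 hg
      have hpres : pvPres p (p.set x ((pvF p (pvF p x) : Nat) : Int)) := pvUpdate_pres hx hFx
      have hre : ∃ k₂ ≤ k - 1, pvReach p k₂ (pvF p (pvF p x)) r := by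
        match k, hk1 with
        | 1, _ =>
          have h1 : pvF p x = r := by
            have := hr.1; rwa [Function.iterate_one] at this
          exact ⟨0, by omega, by rw [h1]; exact ⟨hr.2, hr.2⟩⟩
        | Nat.succ (Nat.succ k₁), _ =>
          refine ⟨k₁, by omega, ?_, hr.2⟩
          have := hr.1
          rwa [Function.iterate_succ_apply, Function.iterate_succ_apply] at this
      obtain ⟨k₂, hk₂, hre⟩ := hre
      obtain ⟨k₃, hk₃, hrq⟩ := hpres _ k₂ r hre
      obtain ⟨p', hrun, hlen, hg', hpres'⟩ :=
        ih k₃ (by omega) (p.set x ((pvF p (pvF p x) : Nat) : Int)) (pvF p (pvF p x)) r fuel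
          hgq (by rw [List.length_set]; exact hx2) hrq (by omega)
      refine ⟨p', ?_, by rw [hlen, List.length_set], hg', ?_⟩
      · simp only [pvFindA, hget]
        rw [if_neg heq]
        simp only [hget2, hset]
        rw [hcast2]
        exact hrun
      · intro i k' r' h
        obtain ⟨a, ha, hb⟩ := hpres i k' r' h
        obtain ⟨c, hc, hd⟩ := hpres' i a r' hb
        exact ⟨c, by omega, hd⟩

-- the find lemma for a possibly negative Python index
theorem pvFindA_spec' {p : List Int} {x : Int} {x₀ r k fuel : Nat}
    (hg : pvGood p) (hx : PySem.List.pyIdx? p.length x = some x₀) (hr : pvReach p k x₀ r)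
    (hf : k + 1 < fuel) :
    ∃ p', pvFindA fuel p x = some (p', (r : Int)) ∧
      p'.length = p.length ∧ pvGood p' ∧ pvPres p p' := by
  by_cases hxn : 0 ≤ x
  · have hxx : x = ((x₀ : Nat) : Int) := by
      have h2 := hx
      simp only [PySem.List.pyIdx?] at h2
      split_ifs at h2
      simp_all
      omega
    rw [hxx]
    exact pvFindA_spec k p x₀ r fuel hg (pvIdx_lt hx) hr (by omega)
  · obtain ⟨fuel, rfl⟩ : ∃ f, fuel = f + 1 := ⟨fuel - 1, by omega⟩
    have hx₀ : x₀ < p.length := pvIdx_lt hx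
    have hget : PySem.List.pyGet? p x = some (p.getD x₀ 0) := pvGet_eq 0 hx
    have hnn : 0 ≤ p.getD x₀ 0 := (hg x₀ hx₀).1
    have heq : ¬ (p.getD x₀ 0 = x) := by intro h; rw [h] at hnn; omega
    have hx1 : pvF p x₀ < p.length := (hg x₀ hx₀).2
    have hcast : p.getD x₀ 0 = ((pvF p x₀ : Nat) : Int) := by
      simp only [pvF]; exact (Int.toNat_of_nonneg hnn).symm
    have hget2 : PySem.List.pyGet? p (p.getD x₀ 0) = some (p.getD (pvF p x₀) 0) := by
      rw [hcast]; exact pvGet_eq 0 (pvIdx_natCast hx1)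
    have hnn2 : 0 ≤ p.getD (pvF p x₀) 0 := (hg _ hx1).1
    have hcast2 : p.getD (pvF p x₀) 0 = ((pvF p (pvF p x₀) : Nat) : Int) := by
      simp only [pvF]; exact (Int.toNat_of_nonneg hnn2).symm
    have hset : PySem.List.pySet? p x (p.getD (pvF p x₀) 0) =
        some (p.set x₀ (p.getD (pvF p x₀) 0)) := pvSet_eq _ hx
    by_cases hFx : pvF p x₀ = x₀
    · have hrx : r = x₀ := by
        have h1 := hr.1
        rw [Function.iterate_fixed hFx] at h1
        omega
      have hq : p.set x₀ (p.getD (pvF p x₀) 0) = p := by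
        rw [hFx, List.getD_eq_getElem?_getD, List.getElem?_eq_getElem hx₀]
        exact List.set_getElem_self hx₀
      have hcast3 : p.getD (pvF p x₀) 0 = ((x₀ : Nat) : Int) := by
        rw [hcast2, hFx, hFx]
      obtain ⟨p', hrun, hlen, hg', hpres'⟩ :=
        pvFindA_spec 0 p x₀ r fuel hg hx₀ ⟨by simpa using hrx.symm, by rw [hrx]; exact hFx⟩ (by omega)
      refine ⟨p', ?_, hlen, hg', hpres'⟩
      simp only [pvFindA, hget]
      rw [if_neg heq]
      simp only [hget2, hset, hq]
      rw [hcast3]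
      exact hrun
    · have hk1 : 1 ≤ k := by
        rcases Nat.eq_zero_or_pos k with h | h
        · exfalso
          subst h
          have h1 : x₀ = r := by simpa using hr.1
          exact hFx (by rw [h1]; exact hr.2)
        · exact h
      have hx2 : pvF p (pvF p x₀) < p.length := (hg _ hx1).2
      have hgq : pvGood (p.set x₀ ((pvF p (pvF p x₀) : Nat) : Int)) := pvGood_set hx₀ hx2 hg
      have hpres : pvPres p (p.set x₀ ((pvF p (pvF p x₀) : Nat) : Int)) := pvUpdate_pres hx₀ hFx
      have hre : ∃ k₂ ≤ k - 1, pvReach p k₂ (pvF p (pvF p x₀)) r := by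
        match k, hk1 with
        | 1, _ =>
          have h1 : pvF p x₀ = r := by
            have := hr.1; rwa [Function.iterate_one] at this
          exact ⟨0, by omega, by rw [h1]; exact ⟨hr.2, hr.2⟩⟩
        | Nat.succ (Nat.succ k₁), _ =>
          refine ⟨k₁, by omega, ?_, hr.2⟩
          have := hr.1
          rwa [Function.iterate_succ_apply, Function.iterate_succ_apply] at this
      obtain ⟨k₂, hk₂, hre⟩ := hre
      obtain ⟨k₃, hk₃, hrq⟩ := hpres _ k₂ r hre
      obtain ⟨p', hrun, hlen, hg', hpres'⟩ :=
        pvFindA_spec k₃ (p.set x₀ ((pvF p (pvF p x₀) : Nat) : Int)) (pvF p (pvF p x₀)) r fuel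
          hgq (by rw [List.length_set]; exact hx2) hrq (by omega)
      refine ⟨p', ?_, by rw [hlen, List.length_set], hg', ?_⟩
      · simp only [pvFindA, hget]
        rw [if_neg heq]
        simp only [hget2, hset]
        rw [hcast2]
        exact hrun
      · intro i k' r' h
        obtain ⟨a, ha, hb⟩ := hpres i k' r' h
        obtain ⟨c, hc, hd⟩ := hpres' i a r' hb
        exact ⟨c, by omega, hd⟩

-- linking one root under another
theorem pvLink_spec {p : List Int} {ra rb : Nat}
    (hrb : rb < p.length)
    (hfa : pvF p ra = ra) (hfb : pvF p rb = rb) (hne : ra ≠ rb) :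
    ∀ k i r, pvReach p k i r →
      (r = rb → pvReach (p.set rb ((ra : Nat) : Int)) (k + 1) i ra) ∧
      (r ≠ rb → pvReach (p.set rb ((ra : Nat) : Int)) k i r) := by
  have hFq : ∀ j, pvF (p.set rb ((ra : Nat) : Int)) j = if j = rb then ra else pvF p j :=
    fun j => pvF_set hrb ra j
  have hqa : pvF (p.set rb ((ra : Nat) : Int)) ra = ra := by
    rw [hFq, if_neg hne]; exact hfa
  intro k
  induction k with
  | zero =>
    intro i r h
    have hir : i = r := h.1
    subst hir
    constructor
    · rintro rfl
      exact ⟨by rw [Function.iterate_one, hFq, if_pos rfl], hqa⟩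
    · intro hr
      exact ⟨rfl, by rw [hFq, if_neg hr]; exact h.2⟩
  | succ k ih =>
    intro i r h
    by_cases hfi : pvF p i = i
    · have hir : i = r := by
        have h1 := h.1
        rwa [Function.iterate_fixed hfi] at h1
      subst hir
      constructor
      · rintro rfl
        refine ⟨?_, hqa⟩
        rw [Function.iterate_succ_apply, hFq, if_pos rfl, Function.iterate_fixed hqa]
      · intro hr
        have hq2 : pvF (p.set rb ((ra : Nat) : Int)) i = i := by rw [hFq, if_neg hr]; exact h.2
        exact ⟨Function.iterate_fixed hq2 (k + 1), hq2⟩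
    · have hib : i ≠ rb := by intro hh; subst hh; exact hfi hfb
      have h2 : pvReach p k (pvF p i) r := ⟨by
        have := h.1; rwa [Function.iterate_succ_apply] at this, h.2⟩
      obtain ⟨ih1, ih2⟩ := ih (pvF p i) r h2
      constructor
      · rintro rfl
        refine ⟨?_, hqa⟩
        rw [Function.iterate_succ_apply, hFq, if_neg hib]
        exact (ih1 rfl).1
      · intro hr
        refine ⟨?_, (ih2 hr).2⟩
        rw [Function.iterate_succ_apply, hFq, if_neg hib]
        exact (ih2 hr).1

-- the effect of linking rb' under ra' on components
theorem pvMerge_spec {p2 : List Int} {ra' rb' U : Nat} (hg2 : pvGood p2)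
    (hra : ra' < p2.length) (hrb : rb' < p2.length)
    (hfa : pvF p2 ra' = ra') (hfb : pvF p2 rb' = rb')
    (hne : ra' ≠ rb') (hB2 : pvBnd p2 U) :
    pvGood (p2.set rb' ((ra' : Nat) : Int)) ∧ pvBnd (p2.set rb' ((ra' : Nat) : Int)) (U + 1) ∧
    ∀ a b, a < p2.length → b < p2.length →
      (pvSame (p2.set rb' ((ra' : Nat) : Int)) a b ↔ (pvSame p2 a b ∨
        ((pvSame p2 a ra' ∨ pvSame p2 a rb') ∧ (pvSame p2 b ra' ∨ pvSame p2 b rb')))) := by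
  have hlink := pvLink_spec hrb hfa hfb hne
  have hgq : pvGood (p2.set rb' ((ra' : Nat) : Int)) := pvGood_set hrb hra hg2
  -- every node's root in the new parent
  have hroot : ∀ a, a < p2.length → ∀ qa ka, pvReach p2 ka a qa →
      pvReach (p2.set rb' ((ra' : Nat) : Int)) (ka + 1) a (if qa = rb' then ra' else qa) := by
    intro a ha qa ka hqa
    by_cases h : qa = rb'
    · rw [if_pos h]; exact (hlink ka a qa hqa).1 h
    · rw [if_neg h]
      have h1 := (hlink ka a qa hqa).2 h
      exact ⟨by rw [Function.iterate_succ_apply', h1.1]; exact h1.2, h1.2⟩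
  refine ⟨hgq, ?_, ?_⟩
  · intro i hi
    rw [List.length_set] at hi
    obtain ⟨k, hk, r, hr⟩ := hB2 i hi
    exact ⟨k + 1, by omega, _, hroot i hi r k hr⟩
  · intro a b ha hb
    obtain ⟨ka, _, qa, hqa⟩ := hB2 a ha
    obtain ⟨kb, _, qb, hqb⟩ := hB2 b hb
    have hqa' := hroot a ha qa ka hqa
    have hqb' := hroot b hb qb kb hqb
    have e1 : pvSame (p2.set rb' ((ra' : Nat) : Int)) a b ↔
        (if qa = rb' then ra' else qa) = (if qb = rb' then ra' else qb) :=
      pvSame_iff_root hqa' hqb'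
    have e2 : pvSame p2 a b ↔ qa = qb := pvSame_iff_root hqa hqb
    have e3 : pvSame p2 a ra' ↔ qa = ra' := pvSame_iff_root hqa (show pvReach p2 0 ra' ra' from ⟨rfl, hfa⟩)
    have e4 : pvSame p2 a rb' ↔ qa = rb' := pvSame_iff_root hqa (show pvReach p2 0 rb' rb' from ⟨rfl, hfb⟩)
    have e5 : pvSame p2 b ra' ↔ qb = ra' := pvSame_iff_root hqb (show pvReach p2 0 ra' ra' from ⟨rfl, hfa⟩)
    have e6 : pvSame p2 b rb' ↔ qb = rb' := pvSame_iff_root hqb (show pvReach p2 0 rb' rb' from ⟨rfl, hfb⟩)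
    rw [e1, e2, e3, e4, e5, e6]
    by_cases h1 : qa = rb' <;> by_cases h2 : qb = rb' <;> simp [h1, h2] <;> omega

-- the union lemma
theorem pvUnionA_spec {p sz : List Int} {num : Int} {u v : Int} {u₀ v₀ U fuel : Nat}
    (hg : pvGood p) (hsz : sz.length = p.length)
    (hu : PySem.List.pyIdx? p.length u = some u₀) (hv : PySem.List.pyIdx? p.length v = some v₀)
    (hB : pvBnd p U) (hf : U + 2 ≤ fuel) :
    ∃ p' sz' did, pvUnionA fuel p sz num u v =
        some (p', sz', if did then num - 1 else num, did) ∧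
      p'.length = p.length ∧ sz'.length = p.length ∧ pvGood p' ∧ pvBnd p' (U + 1) ∧
      (did = false → pvSame p u₀ v₀ ∧ ∀ a b, a < p.length → b < p.length →
        (pvSame p' a b ↔ pvSame p a b)) ∧
      (did = true → ¬ pvSame p u₀ v₀ ∧
        ∀ a b, a < p.length → b < p.length →
          (pvSame p' a b ↔ (pvSame p a b ∨
            ((pvSame p a u₀ ∨ pvSame p a v₀) ∧ (pvSame p b u₀ ∨ pvSame p b v₀))))) := by
  have hu₀ := pvIdx_lt hu
  have hv₀ := pvIdx_lt hv
  obtain ⟨ku, hku, ru, hru⟩ := hB u₀ hu₀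
  obtain ⟨p1, hrun1, hlen1, hg1, hpres1⟩ := pvFindA_spec' hg hu hru (show ku + 1 < fuel by omega)
  obtain ⟨kv, hkv, rv, hrv⟩ := hB v₀ hv₀
  obtain ⟨kv2, hkv2, hrv2⟩ := hpres1 v₀ kv rv hrv
  have hv1 : PySem.List.pyIdx? p1.length v = some v₀ := by rw [hlen1]; exact hv
  obtain ⟨p2, hrun2, hlen2, hg2, hpres2⟩ := pvFindA_spec' hg1 hv1 hrv2 (show kv2 + 1 < fuel by omega)
  have hlen2' : p2.length = p.length := by rw [hlen2, hlen1]
  have hpres12 : pvPres p p2 := by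
    intro i k r h
    obtain ⟨a, ha, hb⟩ := hpres1 i k r h
    obtain ⟨c, hc, hd⟩ := hpres2 i a r hb
    exact ⟨c, by omega, hd⟩
  obtain ⟨ku2, hku2, hru2⟩ := hpres12 u₀ ku ru hru
  obtain ⟨kv2', hkv2', hrv2'⟩ := hpres12 v₀ kv rv hrv
  have hBnd2 : pvBnd p2 U := by
    intro i hi
    rw [hlen2'] at hi
    obtain ⟨k, hk, r, hr⟩ := hB i hi
    obtain ⟨k', hk', hr'⟩ := hpres12 i k r hr
    exact ⟨k', by omega, r, hr'⟩
  have hSame12 : ∀ a b, a < p.length → b < p.length → (pvSame p2 a b ↔ pvSame p a b) := by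
    intro a b ha hb
    obtain ⟨ka, _, qa, hqa⟩ := hB a ha
    obtain ⟨kb, _, qb, hqb⟩ := hB b hb
    obtain ⟨ka', _, hqa'⟩ := hpres12 a ka qa hqa
    obtain ⟨kb', _, hqb'⟩ := hpres12 b kb qb hqb
    rw [pvSame_iff_root hqa' hqb', pvSame_iff_root hqa hqb]
  have hrul : ru < p.length := pvRoot_lt hg ku u₀ ru hu₀ hru
  have hrvl : rv < p.length := pvRoot_lt hg kv v₀ rv hv₀ hrv
  by_cases hrr : ru = rv
  · have hne' : ((ru : Nat) : Int) = ((rv : Nat) : Int) := by exact_mod_cast hrr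
    refine ⟨p2, sz, false, ?_, hlen2', hsz, hg2, fun i hi => by
        obtain ⟨k, hk, r, hr⟩ := hBnd2 i hi; exact ⟨k, by omega, r, hr⟩, ?_, by simp⟩
    · simp only [pvUnionA, hrun1, hrun2]
      rw [if_pos hne']
      simp
    · intro _
      exact ⟨⟨ru, ku, kv, hru, hrr ▸ hrv⟩, hSame12⟩
  · have hne' : ¬ ((ru : Nat) : Int) = ((rv : Nat) : Int) := by
      intro h; exact hrr (by exact_mod_cast h)
    have hfu2 : pvF p2 ru = ru := hru2.2
    have hfv2 : pvF p2 rv = rv := hrv2'.2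
    have hszr : PySem.List.pyGet? sz ((ru : Nat) : Int) = some (sz.getD ru 0) :=
      pvGet_eq 0 (pvIdx_natCast (by rw [hsz]; exact hrul))
    have hszv : PySem.List.pyGet? sz ((rv : Nat) : Int) = some (sz.getD rv 0) :=
      pvGet_eq 0 (pvIdx_natCast (by rw [hsz]; exact hrvl))
    have hnotSame : ¬ pvSame p u₀ v₀ := by
      rw [pvSame_iff_root hru hrv]; exact hrr
    have hSau : ∀ a, a < p.length → (pvSame p2 a ru ↔ pvSame p a u₀) := by
      intro a ha
      obtain ⟨ka, _, qa, hqa⟩ := hB a ha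
      obtain ⟨ka', _, hqa'⟩ := hpres12 a ka qa hqa
      rw [pvSame_iff_root hqa' (show pvReach p2 0 ru ru from ⟨rfl, hfu2⟩), pvSame_iff_root hqa hru]
    have hSav : ∀ a, a < p.length → (pvSame p2 a rv ↔ pvSame p a v₀) := by
      intro a ha
      obtain ⟨ka, _, qa, hqa⟩ := hB a ha
      obtain ⟨ka', _, hqa'⟩ := hpres12 a ka qa hqa
      rw [pvSame_iff_root hqa' (show pvReach p2 0 rv rv from ⟨rfl, hfv2⟩), pvSame_iff_root hqa hrv]
    by_cases hss : sz.getD ru 0 < sz.getD rv 0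
    · -- a' = rv, b' = ru : link ru under rv
      obtain ⟨hgq, hBq, hiff⟩ := pvMerge_spec hg2 (by rw [hlen2']; exact hrvl)
        (by rw [hlen2']; exact hrul) hfv2 hfu2 (Ne.symm hrr) hBnd2
      have hsets : PySem.List.pySet? p2 ((ru : Nat) : Int) ((rv : Nat) : Int) =
          some (p2.set ru ((rv : Nat) : Int)) :=
        pvSet_eq _ (pvIdx_natCast (by rw [hlen2']; exact hrul))
      have hsetsz : PySem.List.pySet? sz ((rv : Nat) : Int) (sz.getD rv 0 + sz.getD ru 0) =
          some (sz.set rv (sz.getD rv 0 + sz.getD ru 0)) :=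
        pvSet_eq _ (pvIdx_natCast (by rw [hsz]; exact hrvl))
      refine ⟨p2.set ru ((rv : Nat) : Int), sz.set rv (sz.getD rv 0 + sz.getD ru 0), true,
        ?_, by rw [List.length_set, hlen2'], by rw [List.length_set, hsz], hgq,
        hBq, by simp, ?_⟩
      · simp only [pvUnionA, hrun1, hrun2]
        rw [if_neg hne']
        simp only [hszr, hszv]
        rw [if_pos hss]
        simp only [hsets, hszv, hszr, hsetsz]
        try simp
      · intro _
        refine ⟨hnotSame, ?_⟩
        intro a b ha hb
        rw [hiff a b (by rw [hlen2']; exact ha) (by rw [hlen2']; exact hb),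
          hSame12 a b ha hb, hSav a ha, hSau a ha, hSav b hb, hSau b hb]
        tauto
    · -- a' = ru, b' = rv : link rv under ru
      obtain ⟨hgq, hBq, hiff⟩ := pvMerge_spec hg2 (by rw [hlen2']; exact hrul)
        (by rw [hlen2']; exact hrvl) hfu2 hfv2 hrr hBnd2
      have hsets : PySem.List.pySet? p2 ((rv : Nat) : Int) ((ru : Nat) : Int) =
          some (p2.set rv ((ru : Nat) : Int)) :=
        pvSet_eq _ (pvIdx_natCast (by rw [hlen2']; exact hrvl))
      have hsetsz : PySem.List.pySet? sz ((ru : Nat) : Int) (sz.getD ru 0 + sz.getD rv 0) =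
          some (sz.set ru (sz.getD ru 0 + sz.getD rv 0)) :=
        pvSet_eq _ (pvIdx_natCast (by rw [hsz]; exact hrul))
      refine ⟨p2.set rv ((ru : Nat) : Int), sz.set ru (sz.getD ru 0 + sz.getD rv 0), true,
        ?_, by rw [List.length_set, hlen2'], by rw [List.length_set, hsz], hgq,
        hBq, by simp, ?_⟩
      · simp only [pvUnionA, hrun1, hrun2]
        rw [if_neg hne']
        simp only [hszr, hszv]
        rw [if_neg hss]
        simp only [hsets, hszv, hszr, hsetsz]
        try simp
      · intro _
        refine ⟨hnotSame, ?_⟩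
        intro a b ha hb
        rw [hiff a b (by rw [hlen2']; exact ha) (by rw [hlen2']; exact hb),
          hSame12 a b ha hb, hSau a ha, hSav a ha, hSau b hb, hSav b hb]

-- relabelling step preserves pvRel through a merge
theorem pvRel_step {labels p p' : List Int} {u₀ v₀ : Nat}
    (hrel : pvRel labels p) (hlen : labels.length = p.length)
    (hu : u₀ < p.length) (hv : v₀ < p.length)
    (hdiff : ¬ pvSame p u₀ v₀)
    (hlen' : p'.length = p.length)
    (hmerge : ∀ a b, a < p.length → b < p.length →
      (pvSame p' a b ↔ (pvSame p a b ∨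
        ((pvSame p a u₀ ∨ pvSame p a v₀) ∧ (pvSame p b u₀ ∨ pvSame p b v₀))))) :
    pvRel (labels.map (fun l => if l = labels.getD v₀ 0 then labels.getD u₀ 0 else l)) p' := by
  have hlulv : labels.getD u₀ 0 ≠ labels.getD v₀ 0 := by
    intro h
    exact hdiff ((hrel u₀ v₀ hu hv).1 h)
  have hmap : ∀ a, a < p.length →
      (labels.map (fun l => if l = labels.getD v₀ 0 then labels.getD u₀ 0 else l)).getD a 0 =
        (fun l => if l = labels.getD v₀ 0 then labels.getD u₀ 0 else l) (labels.getD a 0) := by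
    intro a ha
    have ha' : a < labels.length := by omega
    simp [List.getD_eq_getElem?_getD, List.getElem?_map, List.getElem?_eq_getElem ha']
  intro a b ha' hb'
  rw [hlen'] at ha' hb'
  rw [hmap a ha', hmap b hb', hmerge a b ha' hb',
    ← hrel a b ha' hb', ← hrel a u₀ ha' hu, ← hrel a v₀ ha' hv,
    ← hrel b u₀ hb' hu, ← hrel b v₀ hb' hv]
  simp only []
  split_ifs <;> omega

-- a Python index that is in range resolves
theorem pvIdx_some {len : Nat} {i : Int} (h1 : -(len : Int) ≤ i) (h2 : i < (len : Int)) :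
    ∃ j, PySem.List.pyIdx? len i = some j := by
  by_cases hpos : 0 ≤ i
  · exact ⟨i.toNat, by simp only [PySem.List.pyIdx?, if_pos hpos, if_pos h2]⟩
  · refine ⟨len - (-i).toNat, ?_⟩
    simp only [PySem.List.pyIdx?]
    rw [if_neg hpos, if_pos h1]

-- the main loop lemma
theorem pvLoop_eq (edges : List (Int × Int)) (n : Int) (m : Nat) (hn : 1 ≤ n) :
    ∀ (rest : List Int) (p sz labels : List Int) (rank : Int) (U : Nat),
    (∀ idx ∈ rest, (-(edges.length : Int) ≤ idx ∧ idx < (edges.length : Int)) ∧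
      (let e := (PySem.List.pyGet? edges idx).getD (0, 0);
       -n ≤ e.1 ∧ e.1 < n ∧ -n ≤ e.2 ∧ e.2 < n)) →
    p.length = n.toNat → sz.length = n.toNat → labels.length = n.toNat →
    pvGood p → pvBnd p U → pvRel labels p → U + rest.length ≤ m →
    ∃ p' sz' labels' rank',
      pvLoopA edges (n.toNat + m + 1) rest (p, sz, n - rank, rank) =
        some (p', sz', n - rank', rank') ∧
      pvLoopB edges rest (labels, rank) = some (labels', rank') := by
  intro rest
  induction rest with
  | nil =>
    intro p sz labels rank U _ _ _ _ _ _ _ _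
    exact ⟨p, sz, labels, rank, rfl, rfl⟩
  | cons idx rest ih =>
    intro p sz labels rank U hPre hplen hszlen hllen hgood hbnd hrel hUm
    obtain ⟨⟨hin1, hin2⟩, hbounds⟩ := hPre idx (List.mem_cons_self)
    obtain ⟨j, hj⟩ := pvIdx_some hin1 hin2
    have hgete : PySem.List.pyGet? edges idx = some (edges.getD j (0, 0)) := pvGet_eq _ hj
    simp only [hgete, Option.getD_some] at hbounds
    obtain ⟨hb1, hb2, hb3, hb4⟩ := hbounds
    have hcastn : ((n.toNat : Nat) : Int) = n := Int.toNat_of_nonneg (by omega)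
    have hple : -((p.length : Nat) : Int) ≤ (edges.getD j (0, 0)).1 := by rw [hplen, hcastn]; exact hb1
    have hplt : (edges.getD j (0, 0)).1 < ((p.length : Nat) : Int) := by rw [hplen, hcastn]; exact hb2
    have hvle : -((p.length : Nat) : Int) ≤ (edges.getD j (0, 0)).2 := by rw [hplen, hcastn]; exact hb3
    have hvlt : (edges.getD j (0, 0)).2 < ((p.length : Nat) : Int) := by rw [hplen, hcastn]; exact hb4
    obtain ⟨u₀, hu₀⟩ := pvIdx_some hple hplt
    obtain ⟨v₀, hv₀⟩ := pvIdx_some hvle hvlt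
    have hu₀l : u₀ < p.length := pvIdx_lt hu₀
    have hv₀l : v₀ < p.length := pvIdx_lt hv₀
    obtain ⟨p', sz', did, hrun, hlen', hszlen', hgood', hbnd', hfalse, htrue⟩ :=
      pvUnionA_spec (num := n - rank) hgood (show sz.length = p.length by rw [hszlen, hplen]) hu₀ hv₀ hbnd
        (show U + 2 ≤ n.toNat + m + 1 by rw [List.length_cons] at hUm; omega)
    -- B-side reads
    have hulab : PySem.List.pyIdx? labels.length (edges.getD j (0, 0)).1 = some u₀ := by
      rw [hllen, ← hplen]; exact hu₀
    have hvlab : PySem.List.pyIdx? labels.length (edges.getD j (0, 0)).2 = some v₀ := by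
      rw [hllen, ← hplen]; exact hv₀
    have hgetu : PySem.List.pyGet? labels (edges.getD j (0, 0)).1 = some (labels.getD u₀ 0) :=
      pvGet_eq _ hulab
    have hgetv : PySem.List.pyGet? labels (edges.getD j (0, 0)).2 = some (labels.getD v₀ 0) :=
      pvGet_eq _ hvlab
    cases did with
    | false =>
      obtain ⟨hsame, hkeep⟩ := hfalse rfl
      have hlab : labels.getD u₀ 0 = labels.getD v₀ 0 := (hrel u₀ v₀ hu₀l hv₀l).2 hsame
      have hrel' : pvRel labels p' := by
        intro a b ha hb
        rw [hlen'] at ha hb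
        rw [hkeep a b ha hb]
        exact hrel a b ha hb
      obtain ⟨p'', sz'', labels'', rank'', hA, hB⟩ :=
        ih p' sz' labels rank (U + 1)
          (fun i hi => hPre i (List.mem_cons_of_mem idx hi))
          (by omega) (by omega) hllen hgood' hbnd' hrel' (by rw [List.length_cons] at hUm; omega)
      refine ⟨p'', sz'', labels'', rank'', ?_, ?_⟩
      · simp only [pvLoopA, hgete, hrun]
        simpa using hA
      · simp only [pvLoopB, hgete, hgetu, hgetv]
        rw [if_pos hlab]
        exact hB
    | true =>
      obtain ⟨hdiff, hmerge⟩ := htrue rfl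
      have hlab : ¬ labels.getD u₀ 0 = labels.getD v₀ 0 := by
        intro h
        exact hdiff ((hrel u₀ v₀ hu₀l hv₀l).1 h)
      have hlenlp : labels.length = p.length := by omega
      have hrel' : pvRel
          (labels.map (fun l => if l = labels.getD v₀ 0 then labels.getD u₀ 0 else l)) p' :=
        pvRel_step hrel hlenlp hu₀l hv₀l hdiff hlen' hmerge
      obtain ⟨p'', sz'', labels'', rank'', hA, hB⟩ :=
        ih p' sz' (labels.map (fun l => if l = labels.getD v₀ 0 then labels.getD u₀ 0 else l))
          (rank + 1) (U + 1)
          (fun i hi => hPre i (List.mem_cons_of_mem idx hi))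
          (by omega) (by omega) (by rw [List.length_map]; exact hllen)
          hgood' hbnd' hrel' (by rw [List.length_cons] at hUm; omega)
      refine ⟨p'', sz'', labels'', rank'', ?_, ?_⟩
      · simp only [pvLoopA, hgete, hrun, if_true]
        rw [show n - rank - 1 = n - (rank + 1) from by ring]
        exact hA
      · simp only [pvLoopB, hgete, hgetu, hgetv]
        rw [if_neg hlab]
        exact hB
theorem matroid_rank_and_components_py_spec : Claim_equal_matroid_rank_and_components_py := by
  intro edges n ei hdom hpre
  unfold Spec_matroid_rank_and_components_py
  unfold Pre_matroid_rank_and_components_py at hpre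
  rcases ei with _ | ⟨idx, rest⟩
  · simp [matroid_rank_and_components_py, matroid_rank_and_components_py_alt, pvLoopA, pvLoopB]
  · obtain ⟨⟨hi1, hi2⟩, hb1, hb2, hb3, hb4⟩ := hpre idx List.mem_cons_self
    have hn : 1 ≤ n := by omega
    have hlen0 : (PySem.List.pyRange 0 n 1).length = n.toNat := by
      rw [PySem.List.length_pyRange_one]; simp
    have hget0 : ∀ i, i < n.toNat → (PySem.List.pyRange 0 n 1).getD i 0 = (i : Int) := by
      intro i hi
      rw [List.getD_eq_getElem?_getD,
        List.getElem?_eq_getElem (by rw [hlen0]; exact hi)]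
      rw [PySem.List.getElem_pyRange_one]
      simp
    have hF0 : ∀ i, i < n.toNat → pvF (PySem.List.pyRange 0 n 1) i = i := by
      intro i hi
      simp only [pvF]
      rw [hget0 i hi]
      simp
    have hgood0 : pvGood (PySem.List.pyRange 0 n 1) := by
      intro i hi
      rw [hlen0] at hi
      rw [hget0 i hi]
      refine ⟨by positivity, ?_⟩
      rw [hlen0]
      simpa using hi
    have hbnd0 : pvBnd (PySem.List.pyRange 0 n 1) 0 := by
      intro i hi
      rw [hlen0] at hi
      exact ⟨0, le_refl _, i, rfl, hF0 i hi⟩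
    have hrel0 : pvRel (PySem.List.pyRange 0 n 1) (PySem.List.pyRange 0 n 1) := by
      intro a b ha hb
      rw [hlen0] at ha hb
      rw [hget0 a ha, hget0 b hb,
        pvSame_iff_root (show pvReach (PySem.List.pyRange 0 n 1) 0 a a from ⟨rfl, hF0 a ha⟩)
          (show pvReach (PySem.List.pyRange 0 n 1) 0 b b from ⟨rfl, hF0 b hb⟩)]
      exact ⟨fun h => by exact_mod_cast h, fun h => by exact_mod_cast h⟩
    obtain ⟨p', sz', labels', rank', hA, hB⟩ :=
      pvLoop_eq edges n (idx :: rest).length hn (idx :: rest)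
        (PySem.List.pyRange 0 n 1) (List.replicate n.toNat 1) (PySem.List.pyRange 0 n 1) 0 0
        hpre hlen0 (by simp) hlen0 hgood0 hbnd0 hrel0 (by simp)
    rw [show n - (0 : Int) = n from by ring] at hA
    simp only [matroid_rank_and_components_py, matroid_rank_and_components_py_alt, hlen0, hA, hB]
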